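-- pv_equiv track=rewrite | github.com/jsourabh1/Competitive-Contest-solution | Problem_of_the_Day_GFG/November_challenge/November_9.py | RulingPair
-- ===== SOURCE A (Python) =====
-- from collections import defaultdict
--
-- def RulingPair(arr, n):
-- 	# Your code goes here
--
-- 	dict_1=defaultdict(list)
--
-- 	for i in arr:
--
-- 	    temp=0
-- 	    j=i
-- 	    while j:
-- 	        temp+=j%10
-- 	        j//=10
--
-- 	    dict_1[temp].append(i)
--
--
-- 	ans=0
--
-- 	for i in dict_1.keys():
--
-- 	     if len(dict_1[i])>=2:
-- 	         dict_1[i].sort(reverse=True)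
-- 	         ans=max(ans,dict_1[i][0]+dict_1[i][1])
--
--
-- 	return ans if ans!=0 else -1
-- ===== SOURCE B (Python) =====
-- def _digit_sum(x):
--     s = 0
--     while x:
--         x, r = divmod(x, 10)
--         s += r
--     return s
--
--
-- def RulingPair(arr, n):
--     # single pass: keep the two largest values per digit-sum bucket
--     best = {}
--     for x in arr:
--         d = _digit_sum(x)
--         t = best.get(d)
--         if t is None:
--             best[d] = (x, None)
--         else:
--             a, b = t
--             if x >= a:
--                 a, b = x, a
--             elif b is None or x > b:
--                 b = x
--             best[d] = (a, b)
--     ans = 0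
--     for a, b in best.values():
--         if b is not None:
--             ans = max(ans, a + b)
--     return ans if ans != 0 else -1
-- ===== Notes on version B (the rewrite author's own statement) =====
-- stated objective: alternative
-- what changed: Replaces the bucket-lists-then-sort-each-bucket pass with a single pass that tracks only the two largest values per digit-sum bucket (no list building, no sorting).
import Mathlib
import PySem

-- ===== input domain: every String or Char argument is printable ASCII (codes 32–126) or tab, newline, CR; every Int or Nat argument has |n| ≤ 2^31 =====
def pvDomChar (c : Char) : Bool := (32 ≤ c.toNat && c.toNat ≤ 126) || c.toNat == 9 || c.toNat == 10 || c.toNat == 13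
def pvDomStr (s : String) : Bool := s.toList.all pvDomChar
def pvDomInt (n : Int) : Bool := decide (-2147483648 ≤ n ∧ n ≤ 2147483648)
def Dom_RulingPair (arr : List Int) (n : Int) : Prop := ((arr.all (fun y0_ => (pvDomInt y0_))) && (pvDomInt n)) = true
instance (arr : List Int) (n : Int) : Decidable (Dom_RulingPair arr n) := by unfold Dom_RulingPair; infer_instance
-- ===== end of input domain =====

-- B replaces per-bucket list building + sorting by single-pass top-two tracking per digit-sum bucket; same results, similar cost.

-- ===== PORT A =====
-- digit sum of a nonnegative integer (the 'while j: temp += j%10; j //= 10' loop; exact for j ≥ 0;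
-- on a negative j both Pythons' loops never terminate, so no input where they return is affected)
def pvDigitsGo (m : Nat) : Int :=
  if m = 0 then 0 else (m % 10 : Nat) + pvDigitsGo (m / 10)
decreasing_by exact Nat.div_lt_self (Nat.pos_of_ne_zero (by assumption)) (by norm_num)

def pvDigitSum (i : Int) : Int := pvDigitsGo i.toNat

def RulingPair (arr : List Int) (n : Int) : Int :=
  let dict1 : PySem.Dict Int (List Int) :=
    arr.foldl (fun d i => d.modify (pvDigitSum i) [] (· ++ [i])) PySem.Dict.empty
  let res :=
    dict1.keys.foldl (fun (st : PySem.Dict Int (List Int) × Int) k =>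
      let l := st.1.getD k []
      if 2 ≤ l.length then
        let s := PySem.List.sorted l (fun x => x) true
        (st.1.insert k s, max st.2 (PySem.List.pyGetD s 0 0 + PySem.List.pyGetD s 1 0))
      else st) (dict1, (0 : Int))
  if res.2 ≠ 0 then res.2 else -1

-- ===== PORT B =====
def pvTop2Step (t : Option (Int × Option Int)) (x : Int) : Int × Option Int :=
  match t with
  | none => (x, none)
  | some (a, b) =>
    if a ≤ x then (x, some a)
    else
      match b with
      | none => (a, some x)
      | some b' => if b' < x then (a, some x) else (a, some b')

def RulingPair_alt (arr : List Int) (n : Int) : Int :=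
  let best : PySem.Dict Int (Int × Option Int) :=
    arr.foldl (fun d x => d.insert (pvDigitSum x) (pvTop2Step (d.get? (pvDigitSum x)) x))
      PySem.Dict.empty
  let ans := best.values.foldl (fun ans t =>
      match t.2 with
      | some b => max ans (t.1 + b)
      | none => ans) (0 : Int)
  if ans ≠ 0 then ans else -1

-- ===== PRECONDITION & SPEC =====
def Spec_RulingPair (arr : List Int) (n : Int) (out : Int) : Prop := out = RulingPair_alt arr n
instance (arr : List Int) (n : Int) (out : Int) : Decidable (Spec_RulingPair arr n out) := by
  unfold Spec_RulingPair; infer_instance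

-- ===== CLAIM (what is proved, stated in full; the proofs are below) =====
def Claim_equal_RulingPair : Prop := ∀ (arr : List Int) (n : Int), Dom_RulingPair arr n → Spec_RulingPair arr n (RulingPair arr n)

-- ===== LEMMAS AND PROOFS =====

-- the value B's fold leaves at key k: top-two fold over the bucket of k
def pvT2fold (t : Option (Int × Option Int)) (l : List Int) : Option (Int × Option Int) :=
  l.foldl (fun t x => some (pvTop2Step t x)) t

-- the invariant of the top-two state w.r.t. the multiset of elements seen so far
def pvValid : Option (Int × Option Int) → Multiset Int → Prop
  | none, M => M = 0
  | some (a, none), M => M = {a}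
  | some (a, some b), M => b ≤ a ∧ ∃ rest : Multiset Int, M = a ::ₘ b ::ₘ rest ∧ ∀ x ∈ rest, x ≤ b

theorem pvValid_step (t : Option (Int × Option Int)) (M : Multiset Int) (x : Int)
    (h : pvValid t M) : pvValid (some (pvTop2Step t x)) (x ::ₘ M) := by
  match t with
  | none =>
      simp only [pvValid] at h; subst h; simp [pvTop2Step, pvValid]
  | some (a, none) =>
      simp only [pvValid] at h; subst h
      by_cases hax : a ≤ x
      · simp only [pvTop2Step, if_pos hax, pvValid]
        exact ⟨hax, 0, by simp, by simp⟩
      · simp only [pvTop2Step, if_neg hax, pvValid]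
        exact ⟨(not_le.mp hax).le, 0, by rw [Multiset.cons_swap]; simp, by simp⟩
  | some (a, some b) =>
      obtain ⟨hba, rest, hM, hr⟩ := h
      subst hM
      by_cases hax : a ≤ x
      · simp only [pvTop2Step, if_pos hax, pvValid]
        refine ⟨hax, b ::ₘ rest, rfl, ?_⟩
        intro y hy
        rcases Multiset.mem_cons.mp hy with rfl | h1
        · exact hba
        · exact le_trans (hr y h1) hba
      · by_cases hbx : b < x
        · simp only [pvTop2Step, if_neg hax, if_pos hbx, pvValid]
          refine ⟨(not_le.mp hax).le, b ::ₘ rest,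
            by simp only [← Multiset.singleton_add]; abel, ?_⟩
          intro y hy
          rcases Multiset.mem_cons.mp hy with rfl | h1
          · exact le_of_lt hbx
          · exact le_trans (hr y h1) (le_of_lt hbx)
        · simp only [pvTop2Step, if_neg hax, if_neg hbx, pvValid]
          refine ⟨hba, x ::ₘ rest, by simp only [← Multiset.singleton_add]; abel, ?_⟩
          intro y hy
          rcases Multiset.mem_cons.mp hy with rfl | h1
          · exact not_lt.mp hbx
          · exact hr y h1

theorem pvValid_fold (l : List Int) : ∀ (t : Option (Int × Option Int)) (M : Multiset Int),
    pvValid t M → pvValid (pvT2fold t l) (M + ↑l) := by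
  induction l with
  | nil => intro t M h; simpa [pvT2fold] using h
  | cons x xs ih =>
      intro t M h
      have h' := pvValid_step t M x h
      have := ih (some (pvTop2Step t x)) (x ::ₘ M) h'
      simp only [pvT2fold, List.foldl_cons] at this ⊢
      have hms : (x ::ₘ M) + (↑xs : Multiset Int) = M + ↑(x :: xs) := by
        simp only [← Multiset.cons_coe, ← Multiset.singleton_add]
        abel
      rw [← hms]; exact this

-- the two largest elements of a reverse-sorted list are the two tracked by the fold
theorem pvSorted_top2 (l : List Int) (a b : Int)
    (hv : pvValid (pvT2fold none l) ↑l)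
    (ht : pvT2fold none l = some (a, some b))
    (s0 s1 : Int) (t : List Int)
    (hs : PySem.List.sorted l (fun x => x) true = s0 :: s1 :: t) :
    s0 + s1 = a + b := by
  rw [ht] at hv
  obtain ⟨hba, rest, hM, hr⟩ := hv
  have hperm : (s0 :: s1 :: t).Perm l := hs ▸ PySem.List.sorted_perm l (fun x => x) true
  have hpw : List.Pairwise (fun p q : Int => q ≤ p) (s0 :: s1 :: t) := by
    have := PySem.List.sorted_pairwise_rev l (fun x : Int => x)
    rwa [hs] at this
  have heq : (s0 ::ₘ s1 ::ₘ (↑t : Multiset Int)) = a ::ₘ b ::ₘ rest := by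
    have : ((s0 :: s1 :: t : List Int) : Multiset Int) = (l : Multiset Int) :=
      Multiset.coe_eq_coe.mpr hperm
    simpa [hM] using this
  obtain ⟨h01, hpw1⟩ := List.pairwise_cons.mp hpw
  obtain ⟨h1t, _⟩ := List.pairwise_cons.mp hpw1
  -- every element of the multiset is ≤ a
  have hle_a : ∀ y ∈ (a ::ₘ b ::ₘ rest : Multiset Int), y ≤ a := by
    intro y hy
    rcases Multiset.mem_cons.mp hy with h1 | h1
    · exact le_of_eq h1
    · rcases Multiset.mem_cons.mp h1 with h2 | h2
      · exact h2 ▸ hba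
      · exact le_trans (hr y h2) hba
  -- every element of the list is ≤ s0
  have hle_s0 : ∀ y ∈ (s0 :: s1 :: t : List Int), y ≤ s0 := by
    intro y hy
    rcases List.mem_cons.mp hy with h1 | h1
    · exact le_of_eq h1
    · exact h01 y h1
  have hs0a : s0 = a := by
    have h1 : s0 ≤ a := hle_a s0 (by rw [← heq]; exact Multiset.mem_cons_self _ _)
    have h2 : a ≤ s0 := by
      have : a ∈ (s0 :: s1 :: t : List Int) := by
        have : a ∈ (s0 ::ₘ s1 ::ₘ (↑t : Multiset Int)) := by
          rw [heq]; exact Multiset.mem_cons_self _ _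
        simpa using this
      exact hle_s0 a this
    exact le_antisymm h1 h2
  subst hs0a
  have heq2 : (s1 ::ₘ (↑t : Multiset Int)) = b ::ₘ rest := by
    have := heq
    rwa [Multiset.cons_inj_right] at this
  have hs1b : s1 = b := by
    have h1 : s1 ≤ b := by
      have : s1 ∈ (b ::ₘ rest : Multiset Int) := by
        rw [← heq2]; exact Multiset.mem_cons_self _ _
      rcases Multiset.mem_cons.mp this with h2 | h2
      · exact le_of_eq h2
      · exact hr s1 h2
    have h2 : b ≤ s1 := by
      have hb : b ∈ (s1 ::ₘ (↑t : Multiset Int)) := by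
        rw [heq2]; exact Multiset.mem_cons_self _ _
      rcases Multiset.mem_cons.mp hb with h2 | h2
      · exact le_of_eq h2
      · exact h1t b (by simpa using h2)
    exact le_antisymm h1 h2
  rw [hs1b]

-- per-key value equality: A's sort-and-take-two equals B's tracked pair, for every bucket
theorem pvKey_eq (l : List Int) (ans : Int) :
    (match ((pvT2fold none l).getD (0, none)).2 with
      | some b => max ans (((pvT2fold none l).getD (0, none)).1 + b)
      | none => ans)
    = (if 2 ≤ l.length then
        max ans (PySem.List.pyGetD (PySem.List.sorted l (fun x => x) true) 0 0 +
                 PySem.List.pyGetD (PySem.List.sorted l (fun x => x) true) 1 0)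
      else ans) := by
  match l with
  | [] => simp [pvT2fold]
  | [x] => simp [pvT2fold, pvTop2Step]
  | x :: y :: zs =>
      have hlen : 2 ≤ (x :: y :: zs).length := by simp
      have hv : pvValid (pvT2fold none (x :: y :: zs)) ↑(x :: y :: zs) := by
        have := pvValid_fold (x :: y :: zs) none 0 (by simp [pvValid])
        simpa using this
      have hslen : (PySem.List.sorted (x :: y :: zs) (fun x => x) true).length =
          (x :: y :: zs).length := PySem.List.length_sorted _ _ _
      match hsort : PySem.List.sorted (x :: y :: zs) (fun x => x) true with
      | [] => rw [hsort] at hslen; simp at hslen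
      | [s0] => rw [hsort] at hslen; simp at hslen
      | s0 :: s1 :: t =>
        match ht : pvT2fold none (x :: y :: zs) with
        | none => rw [ht] at hv; simp [pvValid] at hv
        | some (a, none) =>
            rw [ht] at hv
            simp only [pvValid] at hv
            have : (x :: y :: zs).length = ({a} : Multiset Int).card := by
              rw [← hv]; simp
            simp at this
        | some (a, some b) =>
            have hsum : s0 + s1 = a + b := pvSorted_top2 _ a b hv ht s0 s1 t hsort
            rw [if_pos hlen]
            simp only [Option.getD_some]
            rw [PySem.List.pyGetD_zero_cons]
            have h1 : PySem.List.pyGetD (s0 :: s1 :: t) 1 0 = s1 := by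
              have := PySem.List.pyGetD_ofNat' (s0 :: s1 :: t) 1 0
              simpa using this
            rw [h1, hsum]

-- B's dict lookup after the main loop is the top-two fold over the bucket of k
theorem pvB_get (l : List Int) : ∀ (d : PySem.Dict Int (Int × Option Int)) (k : Int),
    (l.foldl (fun d x => d.insert (pvDigitSum x) (pvTop2Step (d.get? (pvDigitSum x)) x)) d).get? k
      = pvT2fold (d.get? k) (l.filter (fun x => pvDigitSum x == k)) := by
  induction l with
  | nil => intro d k; simp [pvT2fold]
  | cons x xs ih =>
      intro d k
      simp only [List.foldl_cons, List.filter_cons]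
      by_cases h : pvDigitSum x = k
      · rw [ih]
        rw [if_pos (by simpa using h)]
        simp only [pvT2fold, List.foldl_cons]
        rw [h, PySem.Dict.get?_insert_self]
      · rw [ih]
        rw [if_neg (by simpa using h)]
        rw [PySem.Dict.get?_insert_of_ne _ _ (fun hk => h hk.symm)]

-- A's dict bucket at k is the sublist of arr with digit sum k
theorem pvA_getD (l : List Int) : ∀ (d : PySem.Dict Int (List Int)) (k : Int),
    (l.foldl (fun d i => d.modify (pvDigitSum i) [] (· ++ [i])) d).getD k []
      = d.getD k [] ++ l.filter (fun x => pvDigitSum x == k) := by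
  induction l with
  | nil => intro d k; simp
  | cons x xs ih =>
      intro d k
      simp only [List.foldl_cons, List.filter_cons]
      by_cases h : pvDigitSum x = k
      · rw [ih, if_pos (by simpa using h), h, PySem.Dict.getD_modify_self]
        simp
      · rw [ih, if_neg (by simpa using h),
          PySem.Dict.getD_modify_of_ne _ _ _ (fun hk => h hk.symm)]

-- A's key loop, which threads the (sorted-in-place) dict through, computes the same answer as a
-- pure fold reading the original buckets, because each (nodup) key is visited once
theorem pvA_loop (ks : List Int) : ∀ (d0 d : PySem.Dict Int (List Int)) (ans : Int),
    ks.Nodup → (∀ k ∈ ks, d.getD k [] = d0.getD k []) →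
    (ks.foldl (fun (st : PySem.Dict Int (List Int) × Int) k =>
        if 2 ≤ (st.1.getD k []).length then
          (st.1.insert k (PySem.List.sorted (st.1.getD k []) (fun x => x) true),
           max st.2
             (PySem.List.pyGetD (PySem.List.sorted (st.1.getD k []) (fun x => x) true) 0 0 +
              PySem.List.pyGetD (PySem.List.sorted (st.1.getD k []) (fun x => x) true) 1 0))
        else st) (d, ans)).2
    = ks.foldl (fun ans k =>
        if 2 ≤ (d0.getD k []).length then
          max ans (PySem.List.pyGetD (PySem.List.sorted (d0.getD k []) (fun x => x) true) 0 0 +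
                   PySem.List.pyGetD (PySem.List.sorted (d0.getD k []) (fun x => x) true) 1 0)
        else ans) ans := by
  induction ks with
  | nil => intro d0 d ans _ _; simp
  | cons k ks ih =>
      intro d0 d ans hnd hag
      obtain ⟨hk, hnd'⟩ := List.nodup_cons.mp hnd
      have hag_k : d.getD k [] = d0.getD k [] := hag k List.mem_cons_self
      simp only [List.foldl_cons]
      by_cases hc : 2 ≤ (d.getD k []).length
      · rw [if_pos hc, if_pos (hag_k ▸ hc)]
        rw [hag_k]
        exact ih d0 _ _ hnd' (fun k' hk' => by
          rw [PySem.Dict.getD_insert_of_ne _ _ _ (fun he => hk (by rw [← he]; exact hk'))]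
          exact hag k' (List.mem_cons_of_mem _ hk'))
      · rw [if_neg hc, if_neg (hag_k ▸ hc)]
        exact ih d0 d ans hnd' (fun k' hk' => hag k' (List.mem_cons_of_mem _ hk'))

-- ===== VERDICT (by name: the statement is the Claim_ definition above) =====
theorem RulingPair_spec : Claim_equal_RulingPair := by
  intro arr n _
  unfold Spec_RulingPair RulingPair RulingPair_alt
  dsimp only []
  -- the two dicts
  set dA : PySem.Dict Int (List Int) :=
    arr.foldl (fun d i => d.modify (pvDigitSum i) [] (· ++ [i])) PySem.Dict.empty with hdA
  set dB : PySem.Dict Int (Int × Option Int) :=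
    arr.foldl (fun d x => d.insert (pvDigitSum x) (pvTop2Step (d.get? (pvDigitSum x)) x))
      PySem.Dict.empty with hdB
  -- same key lists
  have hkA : dA.keys = PySem.Set.update [] (arr.map pvDigitSum) := by
    rw [hdA, PySem.Dict.keys_foldl_modify_key arr pvDigitSum [] (fun _ i => (· ++ [i])),
      PySem.Dict.keys_empty]
  have hkB : dB.keys = PySem.Set.update [] (arr.map pvDigitSum) := by
    rw [hdB, PySem.Dict.keys_foldl_insert_key arr pvDigitSum
      (fun d x => pvTop2Step (d.get? (pvDigitSum x)) x), PySem.Dict.keys_empty]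
  have hndA : dA.keys.Nodup := by
    rw [hdA]
    exact PySem.Dict.nodup_keys_foldl_modify_key arr pvDigitSum [] (fun _ i => (· ++ [i])) _
      PySem.Dict.nodup_keys_empty
  have hndB : dB.keys.Nodup := by
    rw [hdB]
    exact PySem.Dict.nodup_keys_foldl_insert_key arr pvDigitSum
      (fun d x => pvTop2Step (d.get? (pvDigitSum x)) x) _ PySem.Dict.nodup_keys_empty
  -- reduce A's threaded fold to a pure fold over its keys
  rw [pvA_loop dA.keys dA dA 0 hndA (fun _ _ => rfl)]
  -- reduce B's values fold to a fold over its keys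
  rw [PySem.Dict.values_eq_map_keys dB hndB (0, none), List.foldl_map]
  rw [hkA, hkB]
  -- pointwise equal folds
  have hfold : ∀ (ks : List Int) (ans : Int),
      ks.foldl (fun ans k =>
        if 2 ≤ (dA.getD k []).length then
          max ans (PySem.List.pyGetD (PySem.List.sorted (dA.getD k []) (fun x => x) true) 0 0 +
                   PySem.List.pyGetD (PySem.List.sorted (dA.getD k []) (fun x => x) true) 1 0)
        else ans) ans
      = ks.foldl (fun ans k =>
          match (dB.getD k (0, none)).2 with
          | some b => max ans ((dB.getD k (0, none)).1 + b)
          | none => ans) ans := by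
    intro ks ans
    apply (List.foldl_ext _ _ ans ?_).symm
    intro a k _
    have hA : dA.getD k [] = arr.filter (fun x => pvDigitSum x == k) := by
      rw [hdA, pvA_getD]; simp
    have hB : dB.getD k (0, none) =
        (pvT2fold none (arr.filter (fun x => pvDigitSum x == k))).getD (0, none) := by
      rw [PySem.Dict.getD_eq_get?_getD, hdB, pvB_get]
      simp [PySem.Dict.get?_empty]
    rw [hB, hA]
    exact pvKey_eq (arr.filter (fun x => pvDigitSum x == k)) a
  rw [hfold]
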